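-- pv_equiv track=rewrite | github.com/s-yukisato/practice | 068/d.py | decrease
-- ===== SOURCE A (Python) =====
-- def decrease(a):
--     n = len(a)
--     count = 0
--     while max(a) > n - 1:
--         i_max = 0
--         ai_max = a[0]
--         for i in range(1, n):
--             if a[i] > ai_max:
--                 i_max = i
--                 ai_max = a[i]
--         for i in range(n):
--             if i_max == i:
--                 a[i] -= n
--             else:
--                 a[i] += 1
--         count += 1
--     return count, a
-- ===== SOURCE B (Python) =====
-- def decrease(a):
--     # Batched ("abelian") version with a lazy global offset: instead of always
--     # toppling the current maximum one operation at a time, each sweep performs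
--     # all k = (a[i]+off)//n pending operations of every unstable element at once;
--     # the '+1 to everybody else' parts are accumulated in a single offset 'off'
--     # instead of being written out n times.  The operation is confluent, so the
--     # final array and the operation count are identical to A's.  Mutates a in
--     # place, like A.
--     n = len(a)
--     count = 0
--     off = 0
--     while any(x + off >= n for x in a):
--         for i in range(n):
--             if a[i] + off >= n:
--                 k = (a[i] + off) // n
--                 count += k
--                 a[i] -= (n + 1) * k
--                 off += k
--     for i in range(n):
--         a[i] += off
--     return count, a
-- ===== Notes on version B (the rewrite author's own statement) =====
-- stated objective: faster
-- what changed: Instead of simulating one operation at a time on the current maximum (O(count*n) with count ~ sum(a)/n), B batches all k = a[i]//n pending operations of each unstable element in one sweep and repeats until stable; the operation is confluent (abelian-sandpile style), so the step count and final array are provably identical.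
import Mathlib
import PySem

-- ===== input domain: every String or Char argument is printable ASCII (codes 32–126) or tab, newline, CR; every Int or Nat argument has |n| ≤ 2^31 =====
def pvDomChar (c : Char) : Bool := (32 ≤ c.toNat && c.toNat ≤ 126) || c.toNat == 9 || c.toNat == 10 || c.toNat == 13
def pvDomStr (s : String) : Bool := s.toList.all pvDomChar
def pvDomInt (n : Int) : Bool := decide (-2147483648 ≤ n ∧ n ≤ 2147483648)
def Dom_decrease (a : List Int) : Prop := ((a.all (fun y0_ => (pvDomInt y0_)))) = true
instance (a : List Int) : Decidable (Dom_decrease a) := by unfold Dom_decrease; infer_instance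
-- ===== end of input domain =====

-- B batches all a[i]//n pending operations of each unstable element per sweep instead of
-- simulating one max-decrease at a time (the operation is confluent, so count and final
-- array agree); objective: faster.  Both A and B mutate the argument list in place in
-- Python; the equivalence proved here is about the RETURN value (which contains the final
-- array).  The fuel arguments below only make the two while-loops total; 'fuelFor' is a
-- proved upper bound on the number of iterations, so each port computes exactly its
-- Python's value on every input admitted by Pre_.

-- termination potential: sum(a) - len(a) * min(0, min(a)); it is nonnegative and strictly
-- decreases at every operation, so 'fuelFor a' iterations always suffice (proved below)
def min0 (a : List Int) : Int := a.foldl min 0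
def phi (a : List Int) : Int := a.sum - (a.length : Int) * min0 a
def fuelFor (a : List Int) : Nat := (phi a).toNat + 1

-- ===== PORT A =====
-- A's update loop 'for i in range(n): if i_max == i: a[i] -= n else: a[i] += 1' as an
-- elementwise rebuild over the same indices (n = len(a) throughout)
def tpl (i : Nat) (a : List Int) : List Int :=
  a.mapIdx (fun j x => if j = i then x - (a.length : Int) else x + 1)

-- body of A's running-argmax loop; a[i] with an in-range index is pyGetD (exact there)
def astep (a : List Int) (s : Nat × Int) (i : Int) : Nat × Int :=
  if PySem.List.pyGetD a i 0 > s.2 then (i.toNat, PySem.List.pyGetD a i 0) else s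

def decreaseGo (fuel : Nat) (a : List Int) (count : Int) : Int × List Int :=
  match fuel with
  | 0 => (count, a)
  | f + 1 =>
    match PySem.List.max? a (fun x => x) with
    | none => (count, a)            -- Python raises ValueError here (a = []); outside Pre_
    | some m =>
      if m > (a.length : Int) - 1 then
        decreaseGo f
          (tpl ((PySem.List.pyRange 1 (a.length : Int) 1).foldl (astep a) (0, a.getD 0 0)).1 a)
          (count + 1)
      else (count, a)

def decrease (a : List Int) : Int × List Int := decreaseGo (fuelFor a) a 0

-- ===== PORT B =====
-- body of B's sweep over state ((a, off), count): index i with a[i] + off >= n performs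
-- all its k = (a[i]+off) // n pending operations at once (a[i] -= (n+1)*k, off += k,
-- count += k); 'off' is the lazy global "+1 to everybody" accumulator
def bstep (n : Nat) (s : (List Int × Int) × Int) (i : Nat) : (List Int × Int) × Int :=
  if (n : Int) ≤ s.1.1.getD i 0 + s.1.2 then
    let k := PySem.Int.floordiv (s.1.1.getD i 0 + s.1.2) (n : Int)
    ((s.1.1.set i (s.1.1.getD i 0 - ((n : Int) + 1) * k), s.1.2 + k), s.2 + k)
  else s

def decreaseAltGo (fuel : Nat) (a : List Int) (off : Int) (count : Int) : Int × List Int :=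
  match fuel with
  | 0 => (count, a)
  | f + 1 =>
    if a.any (fun x => decide ((a.length : Int) ≤ x + off)) then
      let s := (List.range a.length).foldl (bstep a.length) ((a, off), count)
      decreaseAltGo f s.1.1 s.1.2 s.2
    else (count, a.map (fun x => x + off))   -- B's final 'for i in range(n): a[i] += off'

def decrease_alt (a : List Int) : Int × List Int := decreaseAltGo (fuelFor a) a 0 0

-- ===== PRECONDITION & SPEC =====
-- Pre_ excludes only the empty list, on which Python A raises ValueError (max of empty).
def Pre_decrease (a : List Int) : Prop := a ≠ []
instance (a : List Int) : Decidable (Pre_decrease a) := by unfold Pre_decrease; infer_instance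
def pvWitness_decrease : List Int := ([3, 0, 5] : List Int)

def Spec_decrease (a : List Int) (out : Int × List Int) : Prop := out = decrease_alt a
instance (a : List Int) (out : Int × List Int) : Decidable (Spec_decrease a out) := by unfold Spec_decrease; infer_instance

-- ===== CLAIM (what is proved, stated in full; the proofs are below) =====
def Claim_equal_decrease : Prop := ∀ (a : List Int), Dom_decrease a → Pre_decrease a → Spec_decrease a (decrease a)

-- ===== LEMMAS AND PROOFS =====

theorem length_tpl (i : Nat) (a : List Int) : (tpl i a).length = a.length := by
  simp [tpl]

theorem getD_tpl (i j : Nat) (a : List Int) (hj : j < a.length) :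
    (tpl i a).getD j 0 =
      if j = i then a.getD j 0 - (a.length : Int) else a.getD j 0 + 1 := by
  rw [List.getD_eq_getElem _ _ (by simpa [length_tpl] using hj),
      List.getD_eq_getElem _ _ hj]
  simp [tpl]

theorem tpl_comm (i j : Nat) (a : List Int) (hij : i ≠ j) :
    tpl j (tpl i a) = tpl i (tpl j a) := by
  apply List.ext_getElem
  · simp [length_tpl]
  · intro m h1 h2
    simp only [tpl, List.getElem_mapIdx, List.length_mapIdx]
    split_ifs <;> simp_all <;> ring

theorem mem_tpl {x : Int} {i : Nat} {a : List Int} (hx : x ∈ tpl i a) :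
    ∃ j, ∃ hj : j < a.length,
      x = if j = i then a[j] - (a.length : Int) else a[j] + 1 := by
  rw [List.mem_iff_getElem] at hx
  obtain ⟨j, hj, he⟩ := hx
  have hj' : j < a.length := by simpa [length_tpl] using hj
  refine ⟨j, hj', ?_⟩
  rw [← he]
  simp [tpl]

theorem tpl_eq_set (i : Nat) (a : List Int) (hi : i < a.length) :
    tpl i a = (a.map (· + 1)).set i (a.getD i 0 - (a.length : Int)) := by
  have hgd : a.getD i 0 = a[i] := List.getD_eq_getElem _ _ hi
  apply List.ext_getElem
  · simp [length_tpl]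
  · intro m h1 h2
    simp only [tpl, List.getElem_mapIdx, List.getElem_set, List.getElem_map, hgd]
    by_cases hmi : m = i
    · subst hmi; simp
    · rw [if_neg hmi, if_neg (fun h => hmi h.symm)]

theorem sum_map_succ (a : List Int) : (a.map (· + 1)).sum = a.sum + a.length := by
  induction a with
  | nil => simp
  | cons x t ih => simp [ih]; push_cast; ring

theorem sum_tpl (i : Nat) (a : List Int) (hi : i < a.length) :
    (tpl i a).sum = a.sum - 1 := by
  rw [tpl_eq_set i a hi, List.sum_set', sum_map_succ]
  rw [dif_pos (by simpa using hi)]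
  simp only [List.getElem_map]
  rw [List.getD_eq_getElem _ _ hi]
  ring

theorem min0_nonpos (a : List Int) : min0 a ≤ 0 :=
  (PySem.List.foldl_min_le a 0).1

theorem min0_le_mem {a : List Int} {x : Int} (hx : x ∈ a) : min0 a ≤ x :=
  (PySem.List.foldl_min_le a 0).2 x hx

theorem le_foldl_min (c : Int) (a : List Int) : ∀ (e : Int), c ≤ e → (∀ x ∈ a, c ≤ x) →
    c ≤ a.foldl min e := by
  induction a with
  | nil => intro e h0 _; simpa using h0
  | cons x t ih =>
    intro e h0 h
    simp only [List.foldl_cons]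
    exact ih (min e x) (le_min h0 (h x List.mem_cons_self)) (fun y hy => h y (List.mem_cons_of_mem x hy))

theorem le_min0 (c : Int) (a : List Int) (h0 : c ≤ 0) (h : ∀ x ∈ a, c ≤ x) : c ≤ min0 a :=
  le_foldl_min c a 0 h0 h

theorem card_mul_le_sum (c : Int) (a : List Int) (h : ∀ x ∈ a, c ≤ x) :
    (a.length : Int) * c ≤ a.sum := by
  induction a with
  | nil => simp
  | cons x t ih =>
    have h1 := h x List.mem_cons_self
    have h2 := ih (fun y hy => h y (List.mem_cons_of_mem x hy))
    simp only [List.sum_cons, List.length_cons]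
    push_cast
    nlinarith

theorem phi_nonneg (a : List Int) : 0 ≤ phi a := by
  have := card_mul_le_sum (min0 a) a (fun x hx => min0_le_mem hx)
  unfold phi
  linarith

theorem phi_tpl (i : Nat) (a : List Int) (hi : i < a.length)
    (hx : (a.length : Int) ≤ a.getD i 0) : phi (tpl i a) ≤ phi a - 1 := by
  have hmin : min0 a ≤ min0 (tpl i a) := by
    apply le_min0 _ _ (min0_nonpos a)
    intro x hxm
    obtain ⟨j, hj, he⟩ := mem_tpl hxm
    subst he
    rw [List.getD_eq_getElem _ _ hi] at hx
    split_ifs with hji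
    · subst hji
      have : (0 : Int) ≤ a[j] - a.length := by linarith
      linarith [min0_nonpos a]
    · have : min0 a ≤ a[j] := min0_le_mem (List.getElem_mem hj)
      linarith
  have hs := sum_tpl i a hi
  have hmul : (a.length : Int) * min0 a ≤ (a.length : Int) * min0 (tpl i a) :=
    mul_le_mul_of_nonneg_left hmin (by positivity)
  unfold phi
  rw [hs, length_tpl]
  linarith

-- k steps of the operation, each applied at an index holding at least len(a)
inductive StepsTo : List Int → Nat → List Int → Prop
  | refl (a : List Int) : StepsTo a 0 a
  | step {a : List Int} {k : Nat} {b : List Int} (i : Nat)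
      (hi : i < a.length) (hx : (a.length : Int) ≤ a.getD i 0) :
      StepsTo (tpl i a) k b → StepsTo a (k + 1) b

def Stab (a : List Int) : Prop := ∀ x ∈ a, x < (a.length : Int)

theorem stepsTo_trans {a b c : List Int} {k m : Nat}
    (h1 : StepsTo a k b) (h2 : StepsTo b m c) : StepsTo a (k + m) c := by
  induction h1 with
  | refl a => simpa using h2
  | step i hi hx h ih =>
    rw [Nat.add_right_comm]
    exact StepsTo.step i hi hx (ih h2)

theorem stepsTo_phi {a b : List Int} {k : Nat} (h : StepsTo a k b) :
    phi b + k ≤ phi a := by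
  induction h with
  | refl a => simp
  | step i hi hx h ih =>
    have := phi_tpl i _ hi hx
    push_cast
    push_cast at ih
    linarith

theorem stab_no_step {a : List Int} (hn : Stab a) {i : Nat}
    (hi : i < a.length) : ¬ (a.length : Int) ≤ a.getD i 0 := by
  rw [List.getD_eq_getElem _ _ hi]
  have := hn a[i] (List.getElem_mem hi)
  linarith

-- any single admissible step stays on track to the unique stable form
theorem stepsTo_track {x u : List Int} {k : Nat} (h : StepsTo x k u) (hu : Stab u) :
    ∀ i, i < x.length → (x.length : Int) ≤ x.getD i 0 →
      ∃ k', k = k' + 1 ∧ StepsTo (tpl i x) k' u := by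
  induction h with
  | refl a =>
    intro i hi hx
    exact absurd hx (stab_no_step hu hi)
  | @step a k b j hj hxj h ih =>
    intro i hi hx
    by_cases hij : i = j
    · subst hij
      exact ⟨k, rfl, h⟩
    · obtain ⟨k'', hk, hs⟩ := ih hu i (by rwa [length_tpl])
        (by rw [getD_tpl j i a hi, if_neg hij, length_tpl]; linarith)
      rw [← tpl_comm i j a hij] at hs
      refine ⟨k'' + 1, by omega, ?_⟩
      exact StepsTo.step j (by rwa [length_tpl])
        (by rw [getD_tpl i j a hj, if_neg (fun hh => hij hh.symm), length_tpl]; linarith) hs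

theorem stepsTo_unique {a u v : List Int} {k m : Nat}
    (h1 : StepsTo a k u) (hu : Stab u) (h2 : StepsTo a m v) (hv : Stab v) :
    k = m ∧ u = v := by
  induction h1 generalizing m v with
  | refl a =>
    cases h2 with
    | refl => exact ⟨rfl, rfl⟩
    | step i hi hx h => exact absurd hx (stab_no_step hu hi)
  | @step a k b i hi hx h ih =>
    obtain ⟨m', hm, hs⟩ := stepsTo_track h2 hv i hi hx
    obtain ⟨hk, huv⟩ := ih hu hs hv
    exact ⟨by omega, huv⟩

-- ---- port A reaches a stable form ----
theorem amax_fold (a : List Int) (h0 : 0 < a.length) : ∀ (t : Nat), t ≤ a.length - 1 →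
    (((List.range t).foldl
        (fun (s : Nat × Int) k => if a.getD (k + 1) 0 > s.2 then (k + 1, a.getD (k + 1) 0) else s)
        (0, a.getD 0 0)).1 < a.length ∧
     a.getD ((List.range t).foldl
        (fun (s : Nat × Int) k => if a.getD (k + 1) 0 > s.2 then (k + 1, a.getD (k + 1) 0) else s)
        (0, a.getD 0 0)).1 0 = ((List.range t).foldl
        (fun (s : Nat × Int) k => if a.getD (k + 1) 0 > s.2 then (k + 1, a.getD (k + 1) 0) else s)
        (0, a.getD 0 0)).2 ∧
     ∀ j ≤ t, a.getD j 0 ≤ ((List.range t).foldl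
        (fun (s : Nat × Int) k => if a.getD (k + 1) 0 > s.2 then (k + 1, a.getD (k + 1) 0) else s)
        (0, a.getD 0 0)).2) := by
  intro t
  induction t with
  | zero =>
    intro _
    refine ⟨by simpa using h0, by simp, ?_⟩
    intro j hj
    interval_cases j
    simp
  | succ t ih =>
    intro ht
    obtain ⟨ih1, ih2, ih3⟩ := ih (by omega)
    rw [List.range_succ, List.foldl_append, List.foldl_cons, List.foldl_nil]
    set s := (List.range t).foldl
        (fun (s : Nat × Int) k => if a.getD (k + 1) 0 > s.2 then (k + 1, a.getD (k + 1) 0) else s)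
        (0, a.getD 0 0) with hsdef
    by_cases hc : a.getD (t + 1) 0 > s.2
    · rw [if_pos hc]
      refine ⟨by omega, rfl, ?_⟩
      intro j hj
      rcases Nat.lt_or_ge j (t + 1) with hlt | hge
      · have := ih3 j (by omega)
        simp only
        linarith
      · have : j = t + 1 := by omega
        subst this
        simp
    · rw [if_neg hc]
      refine ⟨ih1, ih2, ?_⟩
      intro j hj
      rcases Nat.lt_or_ge j (t + 1) with hlt | hge
      · exact ih3 j (by omega)
      · have : j = t + 1 := by omega
        subst this
        linarith

theorem foldl_astep_eq (a : List Int) (s : Nat × Int) : ∀ (t : Nat),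
    ((List.range t).map (fun k : Nat => ((k : Int) + 1))).foldl (astep a) s =
      (List.range t).foldl
        (fun (s : Nat × Int) k => if a.getD (k + 1) 0 > s.2 then (k + 1, a.getD (k + 1) 0) else s)
        s := by
  intro t
  induction t with
  | zero => rfl
  | succ t ih =>
    rw [List.range_succ, List.map_append, List.foldl_append, List.foldl_append, ih]
    simp only [List.map_cons, List.map_nil, List.foldl_cons, List.foldl_nil]
    simp only [astep]
    have e1 : PySem.List.pyGetD a ((t : Int) + 1) 0 = a.getD (t + 1) 0 := by
      have e : ((t : Int)) + 1 = ((t + 1 : Nat) : Int) := by push_cast; ring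
      rw [e, PySem.List.pyGetD_natCast]
    have e2 : ((t : Int) + 1).toNat = t + 1 := by omega
    rw [e1, e2]

theorem amax_spec (a : List Int) (ha : a ≠ []) :
    ((PySem.List.pyRange 1 ((a.length : Int)) 1).foldl (astep a) (0, a.getD 0 0)).1 < a.length ∧
    a.getD ((PySem.List.pyRange 1 ((a.length : Int)) 1).foldl (astep a) (0, a.getD 0 0)).1 0 =
      ((PySem.List.pyRange 1 ((a.length : Int)) 1).foldl (astep a) (0, a.getD 0 0)).2 ∧
    ∀ j < a.length, a.getD j 0 ≤
      ((PySem.List.pyRange 1 ((a.length : Int)) 1).foldl (astep a) (0, a.getD 0 0)).2 := by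
  have h0 : 0 < a.length := List.length_pos_iff.mpr ha
  have hrange : PySem.List.pyRange 1 ((a.length : Int)) 1 =
      (List.range (a.length - 1)).map (fun k : Nat => ((k : Int) + 1)) := by
    apply List.ext_getElem
    · rw [PySem.List.length_pyRange_one]
      simp only [List.length_map, List.length_range]
      omega
    · intro m h1 h2
      rw [PySem.List.getElem_pyRange_one]
      simp only [List.getElem_map, List.getElem_range]
      ring
  rw [hrange, foldl_astep_eq]
  obtain ⟨h1, h2, h3⟩ := amax_fold a h0 (a.length - 1) le_rfl
  exact ⟨h1, h2, fun j hj => h3 j (by omega)⟩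

theorem runA (fuel : Nat) : ∀ (a : List Int) (count : Int), a ≠ [] →
    (phi a).toNat < fuel → ∃ (k : Nat) (u : List Int),
      decreaseGo fuel a count = (count + (k : Int), u) ∧ StepsTo a k u ∧ Stab u := by
  induction fuel with
  | zero => intro a count _ hf; omega
  | succ f ih =>
    intro a count ha hf
    rcases hm : PySem.List.max? a (fun x => x) with _ | m
    · cases a with
      | nil => exact absurd rfl ha
      | cons x t => rw [PySem.List.max?_id_cons] at hm; cases hm
    · by_cases hc : m > (a.length : Int) - 1
      · obtain ⟨h1, h2, h3⟩ := amax_spec a ha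
        set p := (PySem.List.pyRange 1 ((a.length : Int)) 1).foldl (astep a) (0, a.getD 0 0) with hp
        have hmem : m ∈ a := PySem.List.max?_mem hm
        obtain ⟨jm, hjm, hjme⟩ := List.mem_iff_getElem.mp hmem
        have hmle : m ≤ p.2 := by
          have := h3 jm hjm
          rwa [List.getD_eq_getElem _ _ hjm, hjme] at this
        have hval : (a.length : Int) ≤ a.getD p.1 0 := by rw [h2]; linarith
        have hphi := phi_tpl p.1 a h1 hval
        have hnn := phi_nonneg (tpl p.1 a)
        obtain ⟨k, u, he, hs, hst⟩ := ih (tpl p.1 a) (count + 1)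
          (by intro hnil; have := length_tpl p.1 a; rw [hnil] at this; simp at this; omega)
          (by omega)
        refine ⟨k + 1, u, ?_, StepsTo.step p.1 h1 hval hs, hst⟩
        simp only [decreaseGo, hm]
        rw [if_pos hc, ← hp, he]
        simp only [Prod.mk.injEq]
        exact ⟨by push_cast; ring, by trivial⟩
      · refine ⟨0, a, ?_, StepsTo.refl a, ?_⟩
        · simp only [decreaseGo, hm]
          rw [if_neg hc]
          all_goals simp
        · intro x hx
          have hxm : x ≤ m := PySem.List.max?_isMax hm x hx
          have hcle : m ≤ (a.length : Int) - 1 := not_lt.mp hc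
          linarith

-- ---- port B reaches a stable form ----
theorem tpl_iterate (t : Nat) (i : Nat) (b : List Int) :
    (tpl i)^[t] b = b.mapIdx (fun j y => if j = i then y - (b.length : Int) * t else y + t) := by
  induction t with
  | zero =>
    apply List.ext_getElem
    · simp
    · intro m h1 h2
      simp [List.getElem_mapIdx]
  | succ t ih =>
    rw [Function.iterate_succ_apply', ih]
    apply List.ext_getElem
    · simp [tpl]
    · intro m h1 h2
      simp only [tpl, List.getElem_mapIdx, List.length_mapIdx]
      push_cast
      split_ifs <;> ring

theorem batch_steps (t : Nat) : ∀ (b : List Int) (i : Nat), i < b.length →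
    (b.length : Int) * t ≤ b.getD i 0 → StepsTo b t ((tpl i)^[t] b) := by
  induction t with
  | zero =>
    intro b i _ _
    rw [Function.iterate_zero_apply]
    exact StepsTo.refl b
  | succ t ih =>
    intro b i hi hx
    have hL : (0 : Int) ≤ (b.length : Int) := by positivity
    have hLt : (0 : Int) ≤ (b.length : Int) * t := by positivity
    have hstep : (b.length : Int) ≤ b.getD i 0 := by push_cast at hx; nlinarith
    have hrec : StepsTo (tpl i b) t ((tpl i)^[t] (tpl i b)) := by
      apply ih (tpl i b) i (by rwa [length_tpl])
      rw [getD_tpl i i b hi, if_pos rfl, length_tpl]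
      push_cast at hx ⊢
      linarith
    rw [Function.iterate_succ_apply]
    exact StepsTo.step i hi hstep hrec

theorem set_map_offset (b : List Int) (off k : Int) (i : Nat) (hi : i < b.length)
    (hk0 : 0 ≤ k) :
    (b.set i (b.getD i 0 - ((b.length : Int) + 1) * k)).map (fun x => x + (off + k)) =
      (tpl i)^[k.toNat] (b.map (fun x => x + off)) := by
  have hgd : b.getD i 0 = b[i] := List.getD_eq_getElem _ _ hi
  have hktn : ((k.toNat : Nat) : Int) = k := Int.toNat_of_nonneg hk0
  rw [tpl_iterate]
  apply List.ext_getElem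
  · simp
  · intro m h1 h2
    simp only [List.getElem_map, List.getElem_set, List.getElem_mapIdx, List.length_map, hgd, hktn]
    by_cases hmi : m = i
    · subst hmi
      rw [if_pos rfl, if_pos rfl]
      ring
    · rw [if_neg (fun h => hmi h.symm), if_neg hmi]
      ring

theorem roundRun (n : Nat) (l : List Nat) : ∀ (b : List Int) (off c : Int), b.length = n →
    (∀ i ∈ l, i < n) →
    ∃ (t : Nat) (b' : List Int) (off' : Int),
      l.foldl (bstep n) ((b, off), c) = ((b', off'), c + (t : Int)) ∧
      StepsTo (b.map (fun x => x + off)) t (b'.map (fun x => x + off')) ∧ b'.length = n ∧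
      (t = 0 → ∀ i ∈ l, b.getD i 0 + off < (n : Int)) := by
  induction l with
  | nil =>
    intro b off c hb _
    exact ⟨0, b, off, by simp, StepsTo.refl _, hb, fun _ i hi => absurd hi (List.not_mem_nil)⟩
  | cons i l ih =>
    intro b off c hb hl
    have hin : i < n := hl i List.mem_cons_self
    have hi' : i < b.length := by omega
    have hn0 : 0 < n := by omega
    have hnI : (0 : Int) < (n : Int) := by exact_mod_cast hn0
    rw [List.foldl_cons]
    by_cases hc : (n : Int) ≤ b.getD i 0 + off
    · set k := PySem.Int.floordiv (b.getD i 0 + off) (n : Int) with hk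
      have hdm := PySem.Int.floordiv_mul_add_mod (b.getD i 0 + off) (n : Int)
      have hm0 : 0 ≤ PySem.Int.mod (b.getD i 0 + off) (n : Int) := by
        first
        | exact PySem.Int.mod_nonneg _ _ hnI
        | exact PySem.Int.mod_nonneg hnI
        | exact PySem.Int.mod_nonneg (b.getD i 0 + off) hnI
      have hmlt : PySem.Int.mod (b.getD i 0 + off) (n : Int) < (n : Int) := by
        first
        | exact PySem.Int.mod_lt _ _ hnI
        | exact PySem.Int.mod_lt hnI
        | exact PySem.Int.mod_lt (b.getD i 0 + off) hnI
      have hkn : k * (n : Int) ≤ b.getD i 0 + off := by rw [hk]; linarith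
      have hk1 : 1 ≤ k := by
        rw [hk]
        by_contra h
        push_neg at h
        have hk0 : PySem.Int.floordiv (b.getD i 0 + off) (n : Int) ≤ 0 := by omega
        nlinarith
      have hktn : ((k.toNat : Nat) : Int) = k := Int.toNat_of_nonneg (by linarith)
      have hreal : (b.map (fun x => x + off)).getD i 0 = b.getD i 0 + off := by
        rw [List.getD_eq_getElem _ _ (by simpa using hi'), List.getD_eq_getElem _ _ hi']
        simp
      have hbt : StepsTo (b.map (fun x => x + off)) k.toNat
          ((tpl i)^[k.toNat] (b.map (fun x => x + off))) := by
        apply batch_steps k.toNat _ i (by simpa using hi')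
        rw [hreal]
        simp only [List.length_map]
        rw [hb, hktn]
        linarith
      have hbeq : bstep n ((b, off), c) i =
          ((b.set i (b.getD i 0 - ((n : Int) + 1) * k), off + k), c + k) := by
        simp only [bstep, if_pos hc, ← hk]
      have hmapeq : (b.set i (b.getD i 0 - ((n : Int) + 1) * k)).map (fun x => x + (off + k)) =
          (tpl i)^[k.toNat] (b.map (fun x => x + off)) := by
        rw [← hb]
        exact set_map_offset b off k i hi' (by linarith)
      obtain ⟨t, b', off', he, hs, hbl, h0⟩ :=
        ih (b.set i (b.getD i 0 - ((n : Int) + 1) * k)) (off + k) (c + k)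
          (by rw [List.length_set, hb]) (fun j hj => hl j (List.mem_cons_of_mem i hj))
      rw [hmapeq] at hs
      refine ⟨k.toNat + t, b', off', ?_, stepsTo_trans hbt hs, hbl, ?_⟩
      · rw [hbeq, he]
        simp only [Prod.mk.injEq]
        refine ⟨by trivial, ?_⟩
        push_cast [hktn]
        ring
      · intro h
        exfalso
        omega
    · have hbeq : bstep n ((b, off), c) i = ((b, off), c) := by simp only [bstep, if_neg hc]
      obtain ⟨t, b', off', he, hs, hbl, h0⟩ :=
        ih b off c hb (fun j hj => hl j (List.mem_cons_of_mem i hj))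
      refine ⟨t, b', off', by rw [hbeq, he], hs, hbl, ?_⟩
      intro h j hj
      rcases List.mem_cons.mp hj with hji | hjl
      · subst hji; linarith
      · exact h0 h j hjl

theorem runB (fuel : Nat) : ∀ (a : List Int) (off count : Int),
    (phi (a.map (fun x => x + off))).toNat < fuel → ∃ (k : Nat) (u : List Int),
      decreaseAltGo fuel a off count = (count + (k : Int), u) ∧
      StepsTo (a.map (fun x => x + off)) k u ∧ Stab u := by
  induction fuel with
  | zero => intro a off count hf; omega
  | succ f ih =>
    intro a off count hf
    by_cases hany : a.any (fun x => decide ((a.length : Int) ≤ x + off)) = true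
    · obtain ⟨t, b', off', he, hs, hbl, h0⟩ := roundRun a.length (List.range a.length) a off count
        rfl (fun i hi => List.mem_range.mp hi)
      have ht1 : 1 ≤ t := by
        by_contra h
        have ht0 : t = 0 := by omega
        simp only [List.any_eq_true, decide_eq_true_eq] at hany
        obtain ⟨x, hxm, hxle⟩ := hany
        obtain ⟨j, hj, hje⟩ := List.mem_iff_getElem.mp hxm
        have := h0 ht0 j (List.mem_range.mpr hj)
        rw [List.getD_eq_getElem _ _ hj, hje] at this
        linarith
      have hphi := stepsTo_phi hs
      have hnn := phi_nonneg (b'.map (fun x => x + off'))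
      obtain ⟨k, u, he2, hs2, hst2⟩ := ih b' off' (count + (t : Int)) (by omega)
      refine ⟨t + k, u, ?_, stepsTo_trans hs hs2, hst2⟩
      rw [decreaseAltGo, if_pos hany]
      simp only [he, he2, Prod.mk.injEq]
      exact ⟨by push_cast; ring, by trivial⟩
    · refine ⟨0, a.map (fun x => x + off), ?_, StepsTo.refl _, ?_⟩
      · rw [decreaseAltGo, if_neg hany]
        all_goals simp
      · intro y hy
        obtain ⟨x, hx, hxy⟩ := List.mem_map.mp hy
        simp only [List.any_eq_true, decide_eq_true_eq] at hany
        push_neg at hany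
        have := hany x hx
        rw [← hxy]
        simpa using this

-- ===== VERDICT (by name: the statement is the Claim_ definition above) =====
theorem decrease_spec : Claim_equal_decrease := by
  intro a _ ha
  obtain ⟨k1, u1, e1, s1, n1⟩ := runA (fuelFor a) a 0 ha (by unfold fuelFor; omega)
  have hmap : a.map (fun x => x + 0) = a := by simp
  obtain ⟨k2, u2, e2, s2, n2⟩ := runB (fuelFor a) a 0 0 (by rw [hmap]; unfold fuelFor; omega)
  rw [hmap] at s2
  obtain ⟨hk, hu⟩ := stepsTo_unique s1 n1 s2 n2
  show decrease a = decrease_alt a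
  rw [decrease, decrease_alt, e1, e2, hk, hu]
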